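-- pv_equiv track=rewrite | github.com/ElizaLo/Practice-Python | Python 3 Programming/course 2/c_2_ex_6.py | beginning
-- ===== SOURCE A (Python) =====
-- def beginning(alist):
--     index = 0
--     new_list = []
--     while index < len(alist):
--         if alist[index] != 'bye':
--             new_list.append(alist[index])
--             index += 1
--         else:
--             return new_list[:10]
--     return new_list[:10]
-- ===== SOURCE B (Python) =====
-- def beginning(alist):
--     try:
--         i = alist.index('bye')
--     except ValueError:
--         i = len(alist)
--     return list(alist[:i])[:10]
-- ===== Notes on version B (the rewrite author's own statement) =====
-- stated objective: faster
-- what changed: B locates the first 'bye' with list.index (falling back to len on ValueError) and returns a double slice, instead of A's element-by-element index/append while-loop with mid-loop return.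
import Mathlib
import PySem

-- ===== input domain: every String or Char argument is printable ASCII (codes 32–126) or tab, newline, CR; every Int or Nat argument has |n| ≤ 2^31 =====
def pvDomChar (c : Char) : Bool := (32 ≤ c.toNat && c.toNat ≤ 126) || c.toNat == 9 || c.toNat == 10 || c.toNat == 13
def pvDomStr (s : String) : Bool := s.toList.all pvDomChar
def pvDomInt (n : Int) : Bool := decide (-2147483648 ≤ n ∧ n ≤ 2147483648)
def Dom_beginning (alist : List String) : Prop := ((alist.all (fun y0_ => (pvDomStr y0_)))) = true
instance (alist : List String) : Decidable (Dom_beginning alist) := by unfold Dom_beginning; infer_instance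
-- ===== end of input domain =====

-- B finds the first 'bye' with list.index (len on ValueError) and returns a double slice,
-- replacing A's index/append while-loop; equal return value on all inputs (no mutation).

-- ===== PORT A =====
-- A's while-loop: walk the list, appending elements until 'bye', returning new_list[:10].
def beginningGo (acc : List String) : List String → List String
  | [] => acc.take 10
  | x :: rest => if x ≠ "bye" then beginningGo (acc ++ [x]) rest else acc.take 10

def beginning (alist : List String) : List String := beginningGo [] alist

-- ===== PORT B =====
def beginning_alt (alist : List String) : List String :=
  let i : Nat := match PySem.List.index? alist "bye" with
    | some k => k
    | none => alist.length
  (alist.take i).take 10   -- alist[:i][:10] for 0 ≤ i: slice = take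

-- ===== PRECONDITION & SPEC =====
def Spec_beginning (alist : List String) (out : List String) : Prop := out = beginning_alt alist
instance (alist : List String) (out : List String) : Decidable (Spec_beginning alist out) := by unfold Spec_beginning; infer_instance

-- ===== CLAIM (what is proved, stated in full; the proofs are below) =====
def Claim_equal_beginning : Prop := ∀ (alist : List String), Dom_beginning alist → Spec_beginning alist (beginning alist)

-- ===== LEMMAS AND PROOFS =====
theorem beginningGo_eq (l : List String) : ∀ acc,
    beginningGo acc l = (acc ++ l.takeWhile (fun x => x ≠ "bye")).take 10 := by
  induction l with
  | nil => intro acc; simp [beginningGo]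
  | cons x rest ih =>
    intro acc
    by_cases hx : x = "bye"
    · simp [beginningGo, hx]
    · simp [beginningGo, hx, ih]

theorem take_idxOf (l : List String) :
    l.take (match List.idxOf? "bye" l with | some k => k | none => l.length)
      = l.takeWhile (fun x => x ≠ "bye") := by
  induction l with
  | nil => simp
  | cons x rest ih =>
    by_cases hx : x = "bye"
    · simp [hx, List.idxOf?_cons]
    · rw [List.idxOf?_cons, if_neg (by simp [hx])]
      cases h : List.idxOf? "bye" rest with
      | none => simpa [h, List.takeWhile_cons, hx] using ih
      | some k => simpa [h, List.takeWhile_cons, hx] using ih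

theorem beginning_alt_eq (l : List String) :
    beginning_alt l = (l.takeWhile (fun x => x ≠ "bye")).take 10 := by
  rw [beginning_alt]
  simp only [PySem.List.index?_eq_idxOf?]
  rw [take_idxOf]

-- ===== VERDICT (by name: the statement is the Claim_ definition above) =====
theorem beginning_spec : Claim_equal_beginning := by
  intro alist _
  unfold Spec_beginning
  rw [beginning, beginningGo_eq, beginning_alt_eq]
  simp
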